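-- pv_equiv track=rewrite | github.com/prsnt558908/CodeZymSolutions | q69-minimum-errors-binary-string/solution-2-python/Solution.py | getMinErrors
-- ===== SOURCE A (Python) =====
-- def getMinErrors(errorString, x, y):
--     """
--     Minimize:
--       errors = x * (# of subsequences "01") + y * (# of subsequences "10")
--     after replacing each '!' by '0' or '1', where subsequences are i<j pairs.
--
--     Observations:
--     - If x <= y, an optimal assignment exists where all '!' are 0...0 then 1...1 (single split).
--       Use baseline all '!' = '1', then flip prefix '!' from 1 -> 0 and track best.
--     - If x > y, an optimal assignment exists where all '!' are 1...1 then 0...0 (single split).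
--       Use baseline all '!' = '0', then flip prefix '!' from 0 -> 1 and track best.
--
--     Time: O(n), Space: O(n) for prefix ones.
--     """
--     MOD = 1_000_000_007
--     n = len(errorString)
--     if n == 0:
--         return 0
--
--     prefer01 = (x <= y)
--     bang_base = '1' if prefer01 else '0'  # baseline replacement for '!'
--
--     prefix_ones = [0] * (n + 1)
--     bang_positions = []
--
--     ones = 0
--     zeros = 0
--     cost = 0
--
--     # Build baseline string implicitly, compute baseline cost in one pass.
--     for i, ch in enumerate(errorString):
--         if ch == '!':
--             ch = bang_base
--             bang_positions.append(i)
--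
--         prefix_ones[i + 1] = prefix_ones[i] + (1 if ch == '1' else 0)
--
--         if ch == '0':
--             # This '0' forms "10" with all previous ones.
--             cost += y * ones
--             zeros += 1
--         else:  # ch == '1'
--             # This '1' forms "01" with all previous zeros.
--             cost += x * zeros
--             ones += 1
--
--     min_cost = cost
--     total_ones_base = ones
--
--     # Flip '!' positions one by one (left to right).
--     # If prefer01: flip 1->0; else flip 0->1.
--     for step, pos in enumerate(bang_positions, start=1):
--         already_flipped = step - 1
--
--         ones_before_base = prefix_ones[pos]
--
--         # Total ones before flipping at this step (after already_flipped flips):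
--         ones_total_before = total_ones_base + (-already_flipped if prefer01 else already_flipped)
--
--         # Ones before pos in current assignment:
--         ones_before = ones_before_base + (-already_flipped if prefer01 else already_flipped)
--         zeros_before = pos - ones_before
--
--         bit_old = 1 if bang_base == '1' else 0  # current bit at pos before flip
--         zeros_total_before = n - ones_total_before
--
--         ones_after = ones_total_before - ones_before - bit_old
--         zeros_after = zeros_total_before - zeros_before - (1 - bit_old)
--
--         if prefer01:
--             # Flip 1 -> 0 at pos
--             delta = (y * ones_before - x * zeros_before) + (x * ones_after - y * zeros_after)
--         else:
--             # Flip 0 -> 1 at pos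
--             delta = (x * zeros_before - y * ones_before) + (y * zeros_after - x * ones_after)
--
--         cost += delta
--         if cost < min_cost:
--             min_cost = cost
--
--     return int(min_cost % MOD)
-- ===== SOURCE B (Python) =====
-- def getMinErrors(errorString, x, y):
--     # Simpler re-implementation: enumerate A's candidate set directly (split k:
--     # first k '!' get the flipped value, the rest the baseline) and rescan the
--     # whole string for each k, keeping the minimum. Return value only; O(n*m).
--     base, flip = ('1', '0') if x <= y else ('0', '1')
--
--     def split_cost(k):
--         remaining = k
--         zeros = ones = cost = 0
--         for ch in errorString:
--             if ch == '!':
--                 if remaining > 0: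
--                     ch = flip
--                     remaining -= 1
--                 else:
--                     ch = base
--             if ch == '0':
--                 cost += y * ones
--                 zeros += 1
--             else:
--                 cost += x * zeros
--                 ones += 1
--         return cost
--
--     m = errorString.count('!')
--     best = min(split_cost(k) for k in range(m + 1))
--     return best % 1_000_000_007
-- ===== Notes on version B (the rewrite author's own statement) =====
-- stated objective: simpler
-- what changed: B drops A's prefix-ones table and incremental flip-delta bookkeeping and instead directly enumerates the same candidate splits (first k '!' flipped, rest baseline), rescanning the whole string from scratch for each k and taking the minimum.
import Mathlib
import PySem

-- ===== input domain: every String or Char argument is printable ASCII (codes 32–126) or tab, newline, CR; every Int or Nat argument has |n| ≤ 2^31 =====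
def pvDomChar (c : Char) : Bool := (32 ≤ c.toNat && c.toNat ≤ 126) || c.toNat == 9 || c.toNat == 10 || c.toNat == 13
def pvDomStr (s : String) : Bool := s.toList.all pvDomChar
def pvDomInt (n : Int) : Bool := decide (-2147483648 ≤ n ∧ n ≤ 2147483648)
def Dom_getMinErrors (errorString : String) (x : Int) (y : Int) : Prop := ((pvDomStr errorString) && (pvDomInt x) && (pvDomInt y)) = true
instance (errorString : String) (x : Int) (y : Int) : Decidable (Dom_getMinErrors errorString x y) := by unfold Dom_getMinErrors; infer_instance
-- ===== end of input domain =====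

-- B replaces A's prefix-sum table and incremental flip deltas by a plain rescan per candidate
-- split; same return value everywhere (objective: simpler).

-- ===== PORT A =====
-- first loop of A: builds prefix_ones (list writes via List.set; all indices in range,
-- and the Python in-range reads prefix_ones[i] are exact as getD i 0), bang positions,
-- running ones/zeros and the baseline cost
def pvA1 (x y : Int) (bb : Char) : List Char → Nat → List Int → List Nat → Int → Int → Int →
    (List Int × List Nat × Int × Int × Int)
  | [], _, po, bp, ones, zeros, cost => (po, bp, ones, zeros, cost)
  | c :: t, i, po, bp, ones, zeros, cost =>
    let ch := if c = '!' then bb else c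
    let bp' := if c = '!' then bp ++ [i] else bp
    let po' := po.set (i + 1) (po.getD i 0 + (if ch = '1' then 1 else 0))
    if ch = '0' then pvA1 x y bb t (i + 1) po' bp' ones (zeros + 1) (cost + y * ones)
    else pvA1 x y bb t (i + 1) po' bp' (ones + 1) zeros (cost + x * zeros)

-- second loop of A: flips the '!' positions left to right, updating cost by delta and the minimum
-- (prefix_ones[pos] is an in-range read, ported as getD pos 0)
def pvA2 (x y n : Int) (prefer01 : Bool) (bb : Char) (po : List Int) (tob : Int) :
    List Nat → Nat → Int → Int → Int
  | [], _, _, mc => mc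
  | pos :: rest, step, cost, mc =>
    let already : Int := (step : Int) - 1
    let obb := po.getD pos 0
    let otb := tob + (if prefer01 then -already else already)
    let ob := obb + (if prefer01 then -already else already)
    let zb := (pos : Int) - ob
    let bitOld : Int := if bb = '1' then 1 else 0
    let ztb := n - otb
    let oa := otb - ob - bitOld
    let za := ztb - zb - (1 - bitOld)
    let delta := if prefer01 then (y * ob - x * zb) + (x * oa - y * za)
                 else (x * zb - y * ob) + (y * za - x * oa)
    let cost' := cost + delta
    let mc' := if cost' < mc then cost' else mc
    pvA2 x y n prefer01 bb po tob rest (step + 1) cost' mc'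

def getMinErrors (errorString : String) (x : Int) (y : Int) : Int :=
  let l := errorString.toList
  let n := l.length
  if n = 0 then 0
  else
    let prefer01 := decide (x ≤ y)
    let bb := if prefer01 then '1' else '0'
    match pvA1 x y bb l 0 (List.replicate (n + 1) 0) [] 0 0 0 with
    | (po, bp, ones, _zeros, cost) =>
      PySem.Int.mod (pvA2 x y (n : Int) prefer01 bb po ones bp 1 cost cost) 1000000007

-- ===== PORT B =====
-- one scan of Source B's split_cost(k): substitute '!' on the fly (first `rem` of them get flip,
-- the rest base) and accumulate the cost
def pvBScan (x y : Int) (base flip : Char) : List Char → Nat → Int → Int → Int → Int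
  | [], _, _, _, cost => cost
  | c :: t, rem, zeros, ones, cost =>
    let p := if c = '!' then (if 0 < rem then (flip, rem - 1) else (base, rem)) else (c, rem)
    if p.1 = '0' then pvBScan x y base flip t p.2 (zeros + 1) ones (cost + y * ones)
    else pvBScan x y base flip t p.2 zeros (ones + 1) (cost + x * zeros)

def getMinErrors_alt (errorString : String) (x : Int) (y : Int) : Int :=
  let l := errorString.toList
  let bf := if x ≤ y then ('1', '0') else ('0', '1')
  let m := l.count '!'   -- errorString.count('!'), one-character pattern
  let costs := (List.range (m + 1)).map (fun k => pvBScan x y bf.1 bf.2 l k 0 0 0)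
  let best := match costs with
    | [] => 0
    | c :: rest => rest.foldl min c
  PySem.Int.mod best 1000000007

-- ===== PRECONDITION & SPEC =====
def Spec_getMinErrors (errorString : String) (x : Int) (y : Int) (out : Int) : Prop := out = getMinErrors_alt errorString x y
instance (errorString : String) (x : Int) (y : Int) (out : Int) : Decidable (Spec_getMinErrors errorString x y out) := by unfold Spec_getMinErrors; infer_instance

-- ===== CLAIM (what is proved, stated in full; the proofs are below) =====
def Claim_equal_getMinErrors : Prop := ∀ (errorString : String) (x : Int) (y : Int), Dom_getMinErrors errorString x y → Spec_getMinErrors errorString x y (getMinErrors errorString x y)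

-- ===== LEMMAS AND PROOFS =====

-- number of characters treated as '1' by the cost scans (any char other than '0')
def pvC1 : List Char → Int
  | [] => 0
  | c :: t => (if c = '0' then 0 else 1) + pvC1 t

-- number of '0' characters
def pvC0 : List Char → Int
  | [] => 0
  | c :: t => (if c = '0' then 1 else 0) + pvC0 t

-- cost of a fully substituted character stream, starting from `o` ones and `z` zeros seen
def pvSc (x y : Int) : List Char → Int → Int → Int
  | [], _, _ => 0
  | c :: t, o, z => if c = '0' then y * o + pvSc x y t o (z + 1) else x * z + pvSc x y t (o + 1) z

-- the assignment of split k: the first k '!' become `f`, the remaining '!' become `b`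
def pvAsg (b f : Char) : Nat → List Char → List Char
  | _, [] => []
  | k, c :: t => if c = '!' then (if 0 < k then f :: pvAsg b f (k - 1) t else b :: pvAsg b f k t)
                 else c :: pvAsg b f k t

-- positions of '!' (strictly increasing)
def pvBangIdx : List Char → List Nat
  | [] => []
  | c :: t => if c = '!' then 0 :: (pvBangIdx t).map (· + 1) else (pvBangIdx t).map (· + 1)

lemma pvC0_add_pvC1 : ∀ t : List Char, pvC0 t + pvC1 t = (t.length : Int) := by
  intro t; induction t with
  | nil => simp [pvC0, pvC1]
  | cons c t ih => simp [pvC0, pvC1]; split_ifs <;> omega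

lemma pvAsg_length (b f : Char) : ∀ (k : Nat) (l : List Char), (pvAsg b f k l).length = l.length := by
  intro k l; induction l generalizing k with
  | nil => simp [pvAsg]
  | cons c t ih => simp only [pvAsg]; split_ifs <;> simp [ih]

lemma pvBangIdx_length : ∀ l : List Char, (pvBangIdx l).length = l.count '!' := by
  intro l; induction l with
  | nil => simp [pvBangIdx]
  | cons c t ih =>
    by_cases hc : c = '!' <;> simp [pvBangIdx, hc, ih]

lemma pvSc_affine (x y : Int) : ∀ (t : List Char) (o z : Int),
    pvSc x y t o z = pvSc x y t 0 0 + o * y * pvC0 t + z * x * pvC1 t := by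
  intro t; induction t with
  | nil => intro o z; simp [pvSc, pvC0, pvC1]
  | cons c t ih =>
    intro o z
    by_cases hc : c = '0' <;> simp only [pvSc, pvC0, pvC1, hc, if_true, if_false] <;>
      rw [ih, ih] <;> ring_nf <;>
      [rw [ih 0 1]; rw [ih 1 0]] <;> ring

lemma pvSc_append (x y : Int) : ∀ (P Q : List Char) (o z : Int),
    pvSc x y (P ++ Q) o z = pvSc x y P o z + pvSc x y Q (o + pvC1 P) (z + pvC0 P) := by
  intro P; induction P with
  | nil => intro Q o z; simp [pvSc, pvC0, pvC1]
  | cons c P ih =>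
    intro Q o z
    by_cases hc : c = '0' <;>
      simp only [List.cons_append, pvSc, pvC0, pvC1, hc, if_true, if_false] <;>
      rw [ih] <;> ring_nf

lemma pvAsg_total (b f : Char) : ∀ (l : List Char) (k : Nat), k ≤ (pvBangIdx l).length →
    pvC1 (pvAsg b f k l) = pvC1 (pvAsg b f 0 l) +
      (k : Int) * ((if f = '0' then 0 else 1) - (if b = '0' then (0 : Int) else 1)) := by
  intro l; induction l with
  | nil => intro k hk; simp [pvBangIdx] at hk; simp [hk, pvAsg]
  | cons c t ih =>
    intro k hk
    by_cases hc : c = '!'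
    · rcases k with _ | k'
      · simp [pvAsg, hc]
      · simp only [pvBangIdx, hc, if_true, List.length_cons, List.length_map] at hk
        have hk' : k' ≤ (pvBangIdx t).length := by omega
        simp only [pvAsg, hc, if_true, Nat.zero_lt_succ, Nat.lt_irrefl, Nat.add_sub_cancel,
          reduceIte, pvC1]
        rw [ih k' hk']
        push_cast; ring
    · simp only [pvBangIdx, hc, if_false, List.length_map] at hk
      simp only [pvAsg, hc, if_false, pvC1]
      rw [ih k hk]
      ring

lemma pvAsg_decomp (b f : Char) : ∀ (l : List Char) (j : Nat), j < (pvBangIdx l).length →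
    ∃ T S, pvAsg b f j l = T ++ b :: S ∧ pvAsg b f (j + 1) l = T ++ f :: S ∧
      T.length = (pvBangIdx l).getD j 0 := by
  intro l; induction l with
  | nil => intro j hj; simp [pvBangIdx] at hj
  | cons c t ih =>
    intro j hj
    by_cases hc : c = '!'
    · rcases j with _ | j'
      · refine ⟨[], pvAsg b f 0 t, ?_, ?_, ?_⟩ <;>
          simp [pvAsg, hc, pvBangIdx]
      · simp only [pvBangIdx, hc, if_true, List.length_cons, List.length_map] at hj
        obtain ⟨T, S, h1, h2, h3⟩ := ih j' (by omega)
        refine ⟨f :: T, S, ?_, ?_, ?_⟩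
        · simp [pvAsg, hc, h1]
        · simp [pvAsg, hc, h2]
        · have hj' : j' < (pvBangIdx t).length := by omega
          simp [pvBangIdx, hc, List.getD_eq_getElem?_getD,
            List.getElem?_map, List.getElem?_eq_getElem hj'] at h3 ⊢
          omega
    · simp only [pvBangIdx, hc, if_false, List.length_map] at hj
      obtain ⟨T, S, h1, h2, h3⟩ := ih j hj
      refine ⟨c :: T, S, ?_, ?_, ?_⟩
      · simp [pvAsg, hc, h1]
      · simp [pvAsg, hc, h2]
      · simp [pvBangIdx, hc, List.getD_eq_getElem?_getD, List.getElem?_map,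
          List.getElem?_eq_getElem hj] at h3 ⊢
        omega

lemma pvC1_append : ∀ P Q : List Char, pvC1 (P ++ Q) = pvC1 P + pvC1 Q := by
  intro P Q; induction P with
  | nil => simp [pvC1]
  | cons c P ih => simp [pvC1, ih]; ring

lemma pvBScan_eq (x y : Int) (b f : Char) : ∀ (t : List Char) (k : Nat) (z o c : Int),
    pvBScan x y b f t k z o c = c + pvSc x y (pvAsg b f k t) o z := by
  intro t; induction t with
  | nil => intro k z o c; simp [pvBScan, pvAsg, pvSc]
  | cons ch t ih =>
    intro k z o c
    by_cases hc : ch = '!'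
    · by_cases hk : 0 < k
      · by_cases hf : f = '0'
        · subst hf
          simp [pvBScan, pvAsg, pvSc, hc, hk]
          rw [ih]; ring
        · simp [pvBScan, pvAsg, pvSc, hc, hk, hf]
          rw [ih]; ring
      · by_cases hb : b = '0'
        · subst hb
          simp [pvBScan, pvAsg, pvSc, hc, hk]
          rw [ih]; ring
        · simp [pvBScan, pvAsg, pvSc, hc, hk, hb]
          rw [ih]; ring
    · by_cases h0 : ch = '0' <;>
        simp [pvBScan, pvAsg, pvSc, hc, h0] <;>
        rw [ih] <;> ring

lemma pvA1_spec (x y : Int) (bb f : Char) : ∀ (t : List Char) (i : Nat) (po : List Int)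
    (bp : List Nat) (o z c : Int),
    ∃ po', pvA1 x y bb t i po bp o z c =
      (po', bp ++ (pvBangIdx t).map (· + i), o + pvC1 (pvAsg bb f 0 t),
        z + pvC0 (pvAsg bb f 0 t), c + pvSc x y (pvAsg bb f 0 t) o z) := by
  intro t; induction t with
  | nil => intro i po bp o z c; exact ⟨po, by simp [pvA1, pvBangIdx, pvAsg, pvC0, pvC1, pvSc]⟩
  | cons ch t ih =>
    intro i po bp o z c
    have hmap : ∀ bs : List Nat, (bs.map (· + 1)).map (· + i) = bs.map (· + (i + 1)) := by
      intro bs; rw [List.map_map]; apply List.map_congr_left; intro a _; simp; omega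
    by_cases hc : ch = '!'
    · by_cases hb : bb = '0'
      · obtain ⟨po', h⟩ := ih (i + 1)
          (po.set (i + 1) (po.getD i 0 + (if bb = '1' then 1 else 0))) (bp ++ [i]) o (z + 1)
          (c + y * o)
        refine ⟨po', ?_⟩
        simp [hb] at h
        simp [pvA1, hc, hb]
        rw [h]
        simp [pvAsg, pvBangIdx, pvC0, pvC1, pvSc, hc, hb, hmap, List.append_assoc, Prod.mk.injEq]
        and_intros <;> first | rfl | ring
      · obtain ⟨po', h⟩ := ih (i + 1)
          (po.set (i + 1) (po.getD i 0 + (if bb = '1' then 1 else 0))) (bp ++ [i]) (o + 1) z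
          (c + x * z)
        refine ⟨po', ?_⟩
        simp [hb] at h
        simp [pvA1, hc, hb]
        rw [h]
        simp [pvAsg, pvBangIdx, pvC0, pvC1, pvSc, hc, hb, hmap, List.append_assoc, Prod.mk.injEq]
        and_intros <;> first | rfl | ring
    · by_cases h0 : ch = '0'
      · obtain ⟨po', h⟩ := ih (i + 1)
          (po.set (i + 1) (po.getD i 0 + (if ch = '1' then 1 else 0))) bp o (z + 1) (c + y * o)
        refine ⟨po', ?_⟩
        simp [h0] at h
        simp [pvA1, hc, h0]
        rw [h]
        simp [pvAsg, pvBangIdx, pvC0, pvC1, pvSc, hc, h0, hmap, Prod.mk.injEq]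
        and_intros <;> first | rfl | ring
      · obtain ⟨po', h⟩ := ih (i + 1)
          (po.set (i + 1) (po.getD i 0 + (if ch = '1' then 1 else 0))) bp (o + 1) z (c + x * z)
        refine ⟨po', ?_⟩
        simp [h0] at h
        simp [pvA1, hc, h0]
        rw [h]
        simp [pvAsg, pvBangIdx, pvC0, pvC1, pvSc, hc, h0, hmap, Prod.mk.injEq]
        and_intros <;> first | rfl | ring

lemma pvSc_cons_affine (x y : Int) (c : Char) (S : List Char) (o z : Int) :
    pvSc x y (c :: S) o z =
      (if c = '0' then y * o + (pvSc x y S 0 0 + o * y * pvC0 S + (z + 1) * x * pvC1 S)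
       else x * z + (pvSc x y S 0 0 + (o + 1) * y * pvC0 S + z * x * pvC1 S)) := by
  by_cases h : c = '0' <;> simp only [pvSc, h, if_true, if_false, reduceIte] <;>
    rw [pvSc_affine] <;> ring

lemma pvA2_spec (x y : Int) (prefer01 : Bool) (b f : Char) (l : List Char) (po : List Int)
    (hbf : (b, f) = if prefer01 then ('1', '0') else ('0', '1')) :
    ∀ (k j : Nat) (cost mc : Int), j + k = (pvBangIdx l).length →
      cost = pvSc x y (pvAsg b f j l) 0 0 →
      pvA2 x y (l.length : Int) prefer01 b po (pvC1 (pvAsg b f 0 l)) ((pvBangIdx l).drop j)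
          (j + 1) cost mc
        = List.foldl min mc (((List.range (pvBangIdx l).length).drop j).map
            (fun i => pvSc x y (pvAsg b f (i + 1) l) 0 0)) := by
  intro k
  induction k with
  | zero =>
    intro j cost mc hj hcost
    have h1 : (pvBangIdx l).drop j = [] := by rw [List.drop_eq_nil_iff]; omega
    have h2 : (List.range (pvBangIdx l).length).drop j = [] := by
      rw [List.drop_eq_nil_iff]; simp; omega
    simp [pvA2, h1, h2]
  | succ k ih =>
    intro j cost mc hj hcost
    have hj' : j < (pvBangIdx l).length := by omega
    have hdrop : (pvBangIdx l).drop j = (pvBangIdx l)[j] :: (pvBangIdx l).drop (j + 1) :=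
      (List.getElem_cons_drop hj').symm
    have hrange : (List.range (pvBangIdx l).length).drop j
        = j :: (List.range (pvBangIdx l).length).drop (j + 1) := by
      have hj2 : j < (List.range (pvBangIdx l).length).length := by simpa using hj'
      have := (List.getElem_cons_drop hj2).symm
      simpa using this
    obtain ⟨T, S, h1, h2, hT⟩ := pvAsg_decomp b f l j hj'
    have hpos : ((pvBangIdx l)[j] : Int) = (T.length : Int) := by
      rw [hT, List.getD_eq_getElem _ _ hj']
    have hn : (l.length : Int) = (T.length : Int) + 1 + (S.length : Int) := by
      have hlen := pvAsg_length b f j l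
      rw [h1] at hlen; simp at hlen; push_cast; omega
    have hc0T : pvC0 T = (T.length : Int) - pvC1 T := by
      have := pvC0_add_pvC1 T; omega
    have hc0S : pvC0 S = (S.length : Int) - pvC1 S := by
      have := pvC0_add_pvC1 S; omega
    have htot := pvAsg_total b f l j (Nat.le_of_lt hj')
    rw [hdrop]
    simp only [pvA2]
    rw [hrange]
    simp only [List.map_cons, List.foldl_cons]
    have key : ∀ E : Int, E = pvSc x y (pvAsg b f (j + 1) l) 0 0 →
        pvA2 x y (l.length : Int) prefer01 b po (pvC1 (pvAsg b f 0 l))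
            ((pvBangIdx l).drop (j + 1)) (j + 1 + 1) E (if E < mc then E else mc)
          = List.foldl min (min mc (pvSc x y (pvAsg b f (j + 1) l) 0 0))
              (((List.range (pvBangIdx l).length).drop (j + 1)).map
                (fun i => pvSc x y (pvAsg b f (i + 1) l) 0 0)) := by
      intro E hE
      subst hE
      rw [ih (j + 1) _ _ (by omega) rfl]
      congr 1
      rcases lt_or_ge (pvSc x y (pvAsg b f (j + 1) l) 0 0) mc with h | h
      · rw [if_pos h, min_eq_right h.le]
      · rw [if_neg (not_lt.mpr h), min_eq_left h]
    apply key
    rcases prefer01 with _ | _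
    · -- prefer01 = false : b = '0', f = '1'
      simp only [Bool.false_eq_true, if_false, reduceIte, Prod.mk.injEq] at hbf ⊢
      obtain ⟨hb, hf⟩ := hbf
      subst hb; subst hf
      have hA : pvC1 (pvAsg '0' '1' j l) = pvC1 T + pvC1 S := by
        rw [h1, pvC1_append]; simp [pvC1]
      have htot' : pvC1 (pvAsg '0' '1' j l) = pvC1 (pvAsg '0' '1' 0 l) + (j : Int) := by
        simpa using htot
      have hBL : pvC1 (pvAsg '0' '1' 0 l) = pvC1 T + pvC1 S - (j : Int) := by omega
      rw [hcost, h1, h2, pvSc_append, pvSc_append, pvSc_cons_affine, pvSc_cons_affine]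
      simp only [reduceIte]
      rw [hc0T, hc0S, hpos, hn, hBL]
      push_cast
      ring
    · -- prefer01 = true : b = '1', f = '0'
      simp only [if_true, reduceIte, Prod.mk.injEq] at hbf ⊢
      obtain ⟨hb, hf⟩ := hbf
      subst hb; subst hf
      have hA : pvC1 (pvAsg '1' '0' j l) = pvC1 T + 1 + pvC1 S := by
        rw [h1, pvC1_append]; simp [pvC1]; ring
      have htot' : pvC1 (pvAsg '1' '0' j l) = pvC1 (pvAsg '1' '0' 0 l) - (j : Int) := by
        have := htot; simp at this; linarith
      have hBL : pvC1 (pvAsg '1' '0' 0 l) = pvC1 T + 1 + pvC1 S + (j : Int) := by omega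
      rw [hcost, h1, h2, pvSc_append, pvSc_append, pvSc_cons_affine, pvSc_cons_affine]
      simp only [reduceIte]
      rw [hc0T, hc0S, hpos, hn, hBL]
      push_cast
      ring

-- ===== VERDICT (by name: the statement is the Claim_ definition above) =====
theorem getMinErrors_spec : Claim_equal_getMinErrors := by
  intro s x y _hdom
  show getMinErrors s x y = getMinErrors_alt s x y
  by_cases hn0 : s.toList.length = 0
  · have hnil : s.toList = [] := List.eq_nil_of_length_eq_zero hn0
    simp [getMinErrors, getMinErrors_alt, hnil, pvBScan]
  · by_cases hxy : x ≤ y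
    · have hd : (decide (x ≤ y)) = true := by simp [hxy]
      obtain ⟨po, hA1⟩ := pvA1_spec x y '1' '0' s.toList 0
        (List.replicate (s.toList.length + 1) 0) [] 0 0 0
      simp only [zero_add] at hA1
      have hA2 := pvA2_spec x y true '1' '0' s.toList po (by simp)
        ((pvBangIdx s.toList).length) 0
        (pvSc x y (pvAsg '1' '0' 0 s.toList) 0 0)
        (pvSc x y (pvAsg '1' '0' 0 s.toList) 0 0) (by omega) rfl
      simp only [List.drop_zero, Nat.zero_add] at hA2
      simp only [getMinErrors, getMinErrors_alt, hn0, if_false, hd, if_true, reduceIte, hxy, decide_true, decide_false]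
      rw [hA1]
      simp only [List.nil_append]
      have hmap0 : (pvBangIdx s.toList).map (· + 0) = pvBangIdx s.toList := by
        simp
      rw [hmap0, hA2, ← pvBangIdx_length, List.range_succ_eq_map, List.map_cons, List.map_map]
      simp only [pvBScan_eq, zero_add, Function.comp_def, Nat.succ_eq_add_one]
    · have hd : (decide (x ≤ y)) = false := by simp [hxy]
      obtain ⟨po, hA1⟩ := pvA1_spec x y '0' '1' s.toList 0
        (List.replicate (s.toList.length + 1) 0) [] 0 0 0
      simp only [zero_add] at hA1
      have hA2 := pvA2_spec x y false '0' '1' s.toList po (by simp)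
        ((pvBangIdx s.toList).length) 0
        (pvSc x y (pvAsg '0' '1' 0 s.toList) 0 0)
        (pvSc x y (pvAsg '0' '1' 0 s.toList) 0 0) (by omega) rfl
      simp only [List.drop_zero, Nat.zero_add] at hA2
      simp only [getMinErrors, getMinErrors_alt, hn0, if_false, hd, reduceIte, hxy, decide_true, decide_false, Bool.false_eq_true]
      rw [hA1]
      simp only [List.nil_append]
      have hmap0 : (pvBangIdx s.toList).map (· + 0) = pvBangIdx s.toList := by
        simp
      rw [hmap0, hA2, ← pvBangIdx_length, List.range_succ_eq_map, List.map_cons, List.map_map]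
      simp only [pvBScan_eq, zero_add, Function.comp_def, Nat.succ_eq_add_one]
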